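-- pv_equiv track=rewrite | github.com/Real-Fruit-Snacks/mainsail | pybox/applets/xargs.py | _tokenize_shell_like
-- ===== SOURCE A (Python) =====
-- def _tokenize_shell_like(data: str) -> list[str]:
--     tokens: list[str] = []
--     current: list[str] = []
--
--     def flush() -> None:
--         if current:
--             tokens.append("".join(current))
--             current.clear()
--
--     in_single = False
--     in_double = False
--     i = 0
--     while i < len(data):
--         c = data[i]
--         if in_single:
--             if c == "'":
--                 in_single = False
--             else:
--                 current.append(c)
--         elif in_double:
--             if c == '"':
--                 in_double = False
--             elif c == "\\" and i + 1 < len(data):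
--                 current.append(data[i + 1])
--                 i += 1
--             else:
--                 current.append(c)
--         else:
--             if c in " \t\n":
--                 flush()
--             elif c == "'":
--                 in_single = True
--             elif c == '"':
--                 in_double = True
--             elif c == "\\" and i + 1 < len(data):
--                 current.append(data[i + 1])
--                 i += 1
--             else:
--                 current.append(c)
--         i += 1
--     flush()
--     return tokens
-- ===== SOURCE B (Python) =====
-- def _tokenize_shell_like(data: str) -> list[str]:
--     tokens: list[str] = []
--     n = len(data)
--     i = 0
--     while i < n:
--         if data[i] in " \t\n":
--             i += 1
--             continue
--         # read one whole token (possibly spanning several quoted segments)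
--         out: list[str] = []
--         while i < n:
--             c = data[i]
--             if c in " \t\n":
--                 break
--             if c == "'":
--                 j = data.find("'", i + 1)
--                 if j == -1:
--                     out.append(data[i + 1:])
--                     i = n
--                 else:
--                     out.append(data[i + 1:j])
--                     i = j + 1
--             elif c == '"':
--                 i += 1
--                 while i < n:
--                     d = data[i]
--                     if d == '"':
--                         i += 1
--                         break
--                     if d == "\\" and i + 1 < n:
--                         out.append(data[i + 1])
--                         i += 2
--                     else:
--                         out.append(d)
--                         i += 1
--             elif c == "\\" and i + 1 < n:
--                 out.append(data[i + 1])
--                 i += 2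
--             else:
--                 out.append(c)
--                 i += 1
--         tok = "".join(out)
--         if tok:
--             tokens.append(tok)
--     return tokens
-- ===== Notes on version B (the rewrite author's own statement) =====
-- stated objective: alternative
-- what changed: Replaced A's flat per-character state machine (in_single/in_double flags with a shared buffer flushed on whitespace) by a nested-loop tokenizer: an outer loop skips whitespace and reads one whole token at a time via dedicated readers for single-quoted segments (str.find + slice), double-quoted segments, and escaped/plain characters.
import Mathlib
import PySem

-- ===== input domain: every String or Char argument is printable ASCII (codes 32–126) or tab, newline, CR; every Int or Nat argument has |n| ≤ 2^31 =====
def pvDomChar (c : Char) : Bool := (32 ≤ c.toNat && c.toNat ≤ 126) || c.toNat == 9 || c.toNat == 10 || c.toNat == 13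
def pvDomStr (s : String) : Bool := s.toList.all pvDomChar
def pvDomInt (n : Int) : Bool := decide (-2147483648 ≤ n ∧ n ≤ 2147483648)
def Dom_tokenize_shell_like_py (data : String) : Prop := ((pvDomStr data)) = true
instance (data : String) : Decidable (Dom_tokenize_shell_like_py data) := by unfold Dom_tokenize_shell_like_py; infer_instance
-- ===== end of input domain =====

-- B replaces A's flat one-character-at-a-time state machine (flags in_single/in_double, shared
-- `current` buffer flushed on whitespace) by a nested-loop decomposition: an outer loop that skips
-- whitespace and reads one whole token at a time, with dedicated inner readers for a single-quoted
-- segment (find-the-closing-quote + slice), a double-quoted segment, and plain/escaped characters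
-- (objective: idiomatic/alternative, same cost).

theorem pvLenLt1 (c : Char) (t : List Char) : t.length < (c :: t).length :=
  Nat.lt_succ_self _

theorem pvLenLt2 (c d : Char) (t : List Char) : t.length < (c :: d :: t).length :=
  Nat.lt_succ_of_lt (Nat.lt_succ_self _)

-- ===== PORT A =====
-- one call of goA = one iteration of A's while loop; escape branches consume two characters
def flushA (cur : List Char) (toks : List String) : List String :=
  if cur = [] then toks else toks ++ [String.mk cur]

def goA : List Char → Bool → Bool → List Char → List String → List String
  | [], _, _, cur, toks => flushA cur toks
  | c :: t, true, in_d, cur, toks =>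
      if c = '\'' then goA t false in_d cur toks
      else goA t true in_d (cur ++ [c]) toks
  | c :: t, false, true, cur, toks =>
      if c = '"' then goA t false false cur toks
      else if c = '\\' then
        match t with
        | d :: t' => goA t' false true (cur ++ [d]) toks
        | [] => goA [] false true (cur ++ [c]) toks
      else goA t false true (cur ++ [c]) toks
  | c :: t, false, false, cur, toks =>
      if c = ' ' ∨ c = '\t' ∨ c = '\n' then goA t false false [] (flushA cur toks)
      else if c = '\'' then goA t true false cur toks
      else if c = '"' then goA t false true cur toks
      else if c = '\\' then
        match t with
        | d :: t' => goA t' false false (cur ++ [d]) toks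
        | [] => goA [] false false (cur ++ [c]) toks
      else goA t false false (cur ++ [c]) toks
termination_by rest _ _ _ _ => rest.length
decreasing_by all_goals first
  | exact pvLenLt1 _ _
  | exact pvLenLt2 _ _ _

def tokenize_shell_like_py (data : String) : List String :=
  goA data.toList false false [] []

-- ===== PORT B =====
def wsB (c : Char) : Bool := c == ' ' || c == '\t' || c == '\n'

-- `data.find("'", i+1)` + slicing, as the obvious single traversal of the remaining list
def rdS (out : List Char) : List Char → List Char × List Char
  | [] => (out, [])
  | c :: t => if c = '\'' then (out, t) else rdS (out ++ [c]) t

-- body of the inner double-quote while loop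
def rdD (out : List Char) : List Char → List Char × List Char
  | [] => (out, [])
  | c :: t =>
      if c = '"' then (out, t)
      else if c = '\\' then
        match t with
        | d :: t' => rdD (out ++ [d]) t'
        | [] => (out ++ [c], [])
      else rdD (out ++ [c]) t

theorem rdS_len (out : List Char) (l : List Char) : (rdS out l).2.length ≤ l.length := by
  induction l generalizing out with
  | nil => simp [rdS]
  | cons c t ih =>
      simp only [rdS]
      split
      · simp
      · exact le_trans (ih _) (by simp)

theorem rdD_len_n (n : Nat) : ∀ (out l : List Char), l.length ≤ n → (rdD out l).2.length ≤ l.length := by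
  induction n with
  | zero =>
      intro out l h
      have hl : l = [] := by cases l <;> simp_all
      subst hl; simp [rdD]
  | succ n ih =>
      intro out l h
      match l with
      | [] => simp [rdD]
      | c :: t =>
          rw [rdD.eq_def]
          by_cases h1 : c = '"'
          · simp [h1]
          · by_cases h2 : c = '\\'
            · match t with
              | d :: t' =>
                  simp only [h1, h2, ite_false, ite_true, if_false, if_true]
                  have := ih (out ++ [d]) t' (by simp at h; omega)
                  simp; omega
              | [] => simp [h1, h2]
            · simp only [h1, h2, ite_false, if_false]
              have := ih (out ++ [c]) t (by simp at h; omega)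
              simp [h1, h2]; omega

theorem rdD_len (out : List Char) (l : List Char) : (rdD out l).2.length ≤ l.length :=
  rdD_len_n l.length out l le_rfl

-- the middle while loop: read one whole token
def rdT (out : List Char) (rest : List Char) : List Char × List Char :=
  match rest with
  | [] => (out, [])
  | c :: t =>
      if wsB c then (out, c :: t)
      else if c = '\'' then
        let p := rdS out t
        rdT p.1 p.2
      else if c = '"' then
        let p := rdD out t
        rdT p.1 p.2
      else if c = '\\' then
        match t with
        | d :: t' => rdT (out ++ [d]) t'
        | [] => rdT (out ++ [c]) []
      else rdT (out ++ [c]) t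
termination_by rest.length
decreasing_by
  · exact Nat.lt_succ_of_le (rdS_len _ _)
  · exact Nat.lt_succ_of_le (rdD_len _ _)
  all_goals first
    | exact pvLenLt1 _ _
    | exact pvLenLt2 _ _ _

-- the outer while loop; ported with an explicit iteration bound (each iteration of the
-- Python loop consumes at least one character, so data.length iterations always suffice;
-- the bound is never reached on any input, see loopB_fuel below)
def loopB : Nat → List Char → List String → List String
  | 0, _, toks => toks
  | _ + 1, [], toks => toks
  | fuel + 1, c :: t, toks =>
      if wsB c then loopB fuel t toks
      else
        let p := rdT [] (c :: t)
        loopB fuel p.2 (toks ++ if p.1 = [] then [] else [String.mk p.1])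

def tokenize_shell_like_py_alt (data : String) : List String :=
  loopB data.toList.length data.toList []

-- ===== PRECONDITION & SPEC =====
def Spec_tokenize_shell_like_py (data : String) (out : List String) : Prop := out = tokenize_shell_like_py_alt data
instance (data : String) (out : List String) : Decidable (Spec_tokenize_shell_like_py data out) := by unfold Spec_tokenize_shell_like_py; infer_instance

-- ===== CLAIM (what is proved, stated in full; the proofs are below) =====
def Claim_equal_tokenize_shell_like_py : Prop := ∀ (data : String), Dom_tokenize_shell_like_py data → Spec_tokenize_shell_like_py data (tokenize_shell_like_py data)

-- ===== LEMMAS AND PROOFS =====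

theorem rdT_nil (out : List Char) : rdT out [] = (out, []) := by
  rw [rdT.eq_def]

theorem rdT_cons (out : List Char) (c : Char) (t : List Char) :
    rdT out (c :: t) =
      (if wsB c then (out, c :: t)
       else if c = '\'' then rdT (rdS out t).1 (rdS out t).2
       else if c = '"' then rdT (rdD out t).1 (rdD out t).2
       else if c = '\\' then
         match t with
         | d :: t' => rdT (out ++ [d]) t'
         | [] => rdT (out ++ [c]) []
       else rdT (out ++ [c]) t) := by
  rw [rdT.eq_def]

theorem rdT_len_n (n : Nat) : ∀ (out rest : List Char), rest.length ≤ n → (rdT out rest).2.length ≤ rest.length := by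
  induction n with
  | zero =>
      intro out rest h
      have hr : rest = [] := by cases rest <;> simp_all
      subst hr; simp [rdT_nil]
  | succ n ih =>
      intro out rest h
      match rest with
      | [] => simp [rdT_nil]
      | c :: t =>
          rw [rdT_cons]
          by_cases hw : wsB c = true
          · simp [hw]
          · by_cases h1 : c = '\''
            · simp only [hw, h1, ite_true, ite_false, if_false, if_true]
              have hs := rdS_len out t
              have := ih (rdS out t).1 (rdS out t).2 (by simp at h; omega)
              simp [wsB]; omega
            · by_cases h2 : c = '"'
              · simp only [hw, h1, h2, ite_true, ite_false, if_false, if_true]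
                have hd := rdD_len out t
                have := ih (rdD out t).1 (rdD out t).2 (by simp at h; omega)
                simp [wsB]; omega
              · by_cases h3 : c = '\\'
                · match t with
                  | d :: t' =>
                      simp only [hw, h1, h2, h3, ite_true, ite_false, if_false, if_true]
                      have := ih (out ++ [d]) t' (by simp at h; omega)
                      simp [wsB]; omega
                  | [] =>
                      simp [wsB, hw, h1, h2, h3, rdT_nil]
                · simp only [hw, h1, h2, h3, ite_true, ite_false, if_false, if_true]
                  have := ih (out ++ [c]) t (by simp at h; omega)
                  simp [wsB]; omega

theorem rdT_len (out : List Char) (rest : List Char) : (rdT out rest).2.length ≤ rest.length :=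
  rdT_len_n rest.length out rest le_rfl

theorem rdT_progress (out : List Char) (c : Char) (t : List Char) (h : ¬ wsB c = true) :
    (rdT out (c :: t)).2.length < (c :: t).length := by
  rw [rdT_cons]
  simp only [if_neg h]
  split
  · exact Nat.lt_succ_of_le (le_trans (rdT_len _ _) (rdS_len _ _))
  · split
    · exact Nat.lt_succ_of_le (le_trans (rdT_len _ _) (rdD_len _ _))
    · split
      · split
        · exact Nat.lt_succ_of_le (le_trans (rdT_len _ _) (by simp))
        · exact Nat.lt_succ_of_le (rdT_len _ _)
      · exact Nat.lt_succ_of_le (rdT_len _ _)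


def optTok (cur : List Char) : List String :=
  if cur = [] then [] else [String.mk cur]

theorem flushA_eq (cur : List Char) (toks : List String) :
    flushA cur toks = toks ++ optTok cur := by
  unfold flushA optTok; split <;> simp

-- A's single-quote state runs exactly like B's single-quote reader
theorem goA_single (toks : List String) : ∀ (rest cur : List Char),
    goA rest true false cur toks = goA (rdS cur rest).2 false false (rdS cur rest).1 toks := by
  intro rest
  induction rest with
  | nil => intro cur; simp [rdS, goA]
  | cons c t ih =>
      intro cur
      by_cases hc : c = '\''
      · rw [goA.eq_def]; simp [hc, rdS]
      · rw [goA.eq_def]; simp only [if_neg hc, rdS]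
        exact ih (cur ++ [c])

-- A's double-quote state runs exactly like B's double-quote reader
theorem goA_double (toks : List String) : ∀ (cur rest : List Char),
    goA rest false true cur toks = goA (rdD cur rest).2 false false (rdD cur rest).1 toks := by
  intro cur rest
  induction cur, rest using rdD.induct with
  | case1 out => simp [rdD, goA]
  | case2 out t => rw [goA.eq_def]; rw [rdD.eq_def]; simp
  | case3 out d t' h ih =>
      rw [goA.eq_def]; rw [rdD.eq_def]
      simpa [h] using ih
  | case4 out h => rw [goA.eq_def]; rw [rdD.eq_def]; simp [h, goA]
  | case5 out c t h h2 ih =>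
      rw [goA.eq_def]; rw [rdD.eq_def]
      simpa [h, h2] using ih

theorem wsB_iff (c : Char) : wsB c = true ↔ (c = ' ' ∨ c = '\t' ∨ c = '\n') := by
  simp [wsB]; tauto

-- the fuel bound is irrelevant once it covers the remaining length
theorem loopB_fuel : ∀ (f1 f2 : Nat) (t : List Char) (X : List String),
    t.length ≤ f1 → t.length ≤ f2 → loopB f1 t X = loopB f2 t X := by
  intro f1
  induction f1 with
  | zero =>
      intro f2 t X h1 _
      have ht : t = [] := by cases t <;> simp_all
      subst ht
      cases f2 <;> simp [loopB]
  | succ f1 ih =>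
      intro f2 t X h1 h2
      cases t with
      | nil => cases f2 <;> simp [loopB]
      | cons c t' =>
          match f2, h2 with
          | f2 + 1, h2 =>
            simp only [loopB]
            by_cases hw : wsB c = true
            · simp only [if_pos hw]
              exact ih f2 t' X (by simp at h1; omega) (by simp at h2; omega)
            · simp only [if_neg hw]
              have hp := rdT_progress [] c t' hw
              exact ih f2 _ _ (by simp at h1 hp ⊢; omega) (by simp at h2 hp ⊢; omega)

-- unfolding one token read of B's outer loop (with the canonical fuel t.length)
theorem loopB_step (t : List Char) (X : List String) :
    loopB t.length t X = loopB (rdT [] t).2.length (rdT [] t).2 (X ++ optTok (rdT [] t).1) := by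
  cases t with
  | nil => simp [rdT_nil, loopB, optTok]
  | cons d t' =>
      by_cases hw : wsB d = true
      · rw [rdT_cons]; simp [hw, optTok, loopB]
      · simp only [List.length_cons, loopB, if_neg hw]
        have hp := rdT_progress [] d t' hw
        exact loopB_fuel t'.length _ _ _ (by simp at hp ⊢; omega) le_rfl

-- main invariant: A's neutral state = one B token read followed by B's outer loop
theorem goA_loopB : ∀ (n : Nat) (rest cur : List Char) (toks : List String), rest.length ≤ n →
    goA rest false false cur toks = loopB (rdT cur rest).2.length (rdT cur rest).2 (toks ++ optTok (rdT cur rest).1) := by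
  intro n
  induction n with
  | zero =>
      intro rest cur toks h
      have hr : rest = [] := by cases rest <;> simp_all
      subst hr
      simp [goA, rdT_nil, loopB, flushA_eq]
  | succ n ih =>
      intro rest cur toks h
      cases rest with
      | nil => simp [goA, rdT_nil, loopB, flushA_eq]
      | cons c t =>
          by_cases hw : wsB c = true
          · -- whitespace: A flushes and continues; B's reader stops here
            have hw' := (wsB_iff c).mp hw
            rw [goA.eq_def]; simp only [if_pos hw']
            rw [rdT_cons]; simp only [if_pos hw]
            have h1 : t.length ≤ n := by simp at h; omega
            simp only [List.length_cons, loopB, if_pos hw]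
            rw [ih t [] (flushA cur toks) h1, flushA_eq]
            rw [loopB_fuel t.length (t.length) t (toks ++ optTok cur) le_rfl le_rfl]
            exact (loopB_step t (toks ++ optTok cur)).symm
          · have hw' : ¬ (c = ' ' ∨ c = '\t' ∨ c = '\n') := fun hh => hw ((wsB_iff c).mpr hh)
            rw [goA.eq_def]; simp only [if_neg hw']
            rw [rdT_cons]; simp only [if_neg hw]
            by_cases hq : c = '\''
            · simp only [if_pos hq]
              rw [goA_single toks t cur]
              exact ih _ _ _ (by simp at h; exact le_trans (rdS_len cur t) (by omega))
            · simp only [if_neg hq]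
              by_cases hd : c = '"'
              · simp only [if_pos hd]
                rw [goA_double toks cur t]
                exact ih _ _ _ (by simp at h; exact le_trans (rdD_len cur t) (by omega))
              · simp only [if_neg hd]
                by_cases hb : c = '\\'
                · simp only [if_pos hb]
                  cases t with
                  | nil => simp [goA, rdT_nil, loopB, flushA_eq]
                  | cons d t' =>
                      exact ih _ _ _ (by simp at h; omega)
                · simp only [if_neg hb]
                  exact ih _ _ _ (by simp at h; omega)

-- ===== VERDICT (by name: the statement is the Claim_ definition above) =====
theorem tokenize_shell_like_py_spec : Claim_equal_tokenize_shell_like_py := by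
  intro data _
  unfold Spec_tokenize_shell_like_py tokenize_shell_like_py tokenize_shell_like_py_alt
  rw [goA_loopB data.toList.length data.toList [] [] le_rfl]
  simp only [List.nil_append]
  exact (loopB_step data.toList []).symm
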